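-- pv_equiv track=rewrite | github.com/ijustlovemath/lexical_bot_detection | detector.py | common_phrases
-- ===== SOURCE A (Python) =====
-- def k_strings(string, k=3):
--     '''generate all length k subsequences of string'''
--     if k > len(string):
--         raise ValueError("unable to compute k-strings for strings with length less than k")
--
--     n = len(string) - k + 1
--
--     return [string[i:i+k] for i in range(n)]
--
-- def rolling_hash(message, message_id, k=3):
--     '''compute rolling hash of all k-substrings of message'''
--     dictionary = {}
--     for s in k_strings(message, k):
--         dictionary[s] = (message, message_id)
--     return dictionary
--
-- def common_phrases(messages, k):
--     phrases = None
--     for message in messages: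
--         keys = set(rolling_hash(message, 0, k).keys())
--         if phrases is None:
--             phrases = keys
--         else:
--             phrases.intersection_update(keys)
--
--     return phrases
-- ===== SOURCE B (Python) =====
-- def k_strings(string, k=3):
--     '''generate all length k subsequences of string'''
--     if k > len(string):
--         raise ValueError("unable to compute k-strings for strings with length less than k")
--
--     n = len(string) - k + 1
--
--     return [string[i:i+k] for i in range(n)]
--
-- def common_phrases(messages, k):
--     # One pass: count, for each k-substring, in how many messages it occurs
--     # (each message's distinct substrings counted once), then keep those
--     # whose count equals the number of messages.
--     if not messages:
--         return None
--     counts = {}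
--     for message in messages:
--         for s in dict.fromkeys(k_strings(message, k)):
--             counts[s] = counts.get(s, 0) + 1
--     n = len(messages)
--     return {s for s, c in counts.items() if c == n}
-- ===== Notes on version B (the rewrite author's own statement) =====
-- stated objective: alternative
-- what changed: Replaces the iterated set-intersection loop by a single occurrence counter: one dict maps each k-substring to the number of messages containing it (distinct per message), and the result is the substrings whose count equals the number of messages.
import Mathlib
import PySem

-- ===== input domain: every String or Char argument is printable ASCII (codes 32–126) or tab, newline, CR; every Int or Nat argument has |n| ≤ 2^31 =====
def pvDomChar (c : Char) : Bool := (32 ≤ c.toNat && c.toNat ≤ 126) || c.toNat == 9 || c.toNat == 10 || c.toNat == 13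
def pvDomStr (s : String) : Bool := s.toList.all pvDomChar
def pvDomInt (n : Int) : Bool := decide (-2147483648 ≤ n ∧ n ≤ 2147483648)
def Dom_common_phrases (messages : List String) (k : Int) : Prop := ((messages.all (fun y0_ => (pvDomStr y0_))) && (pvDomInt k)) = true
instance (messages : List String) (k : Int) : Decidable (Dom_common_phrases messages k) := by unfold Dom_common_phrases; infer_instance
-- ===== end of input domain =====

-- B replaces A's iterated set-intersection loop by one occurrence-counting dict (in how many
-- messages each k-substring occurs; keep those hitting the message count): alternative, same cost.


-- ===== PORT A =====
-- k_strings: none = ValueError (k > len(string)); shared helper of both Pythons (Source B reuses it)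
def kStrings? (string : String) (k : Int) : Option (List String) :=
  if k > PySem.Str.len string then none
  else
    some ((PySem.List.pyRange 0 (PySem.Str.len string - k + 1) 1).map
      (fun i => PySem.Str.slice string (some i) (some (i + k))))

-- rolling_hash; the '.getD []' is exact under Pre_ (inside Pre_ k_strings never raises)
def rollingHash (message : String) (messageId : Int) (k : Int) : PySem.Dict String (String × Int) :=
  ((kStrings? message k).getD []).foldl
    (fun d s => d.insert s (message, messageId)) PySem.Dict.empty

def common_phrases (messages : List String) (k : Int) : Option (List String) :=
  messages.foldl
    (fun phrases message =>
      let keys : PySem.Set String := PySem.Set.ofList (rollingHash message 0 k).keys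
      match phrases with
      | none => some keys
      | some p => some (PySem.Set.inter p keys))
    none

-- ===== PORT B =====
def common_phrases_alt (messages : List String) (k : Int) : Option (List String) :=
  if messages = [] then none
  else
    let counts : PySem.Dict String Int :=
      messages.foldl
        (fun d message =>
          (PySem.List.dedup ((kStrings? message k).getD [])).foldl
            (fun d s => d.insert s (d.getD s 0 + 1)) d)
        PySem.Dict.empty
    let n : Int := PySem.List.len messages
    some ((counts.items.filter (fun p => p.2 == n)).map (·.1))

-- ===== PRECONDITION & SPEC =====
-- Pre_ excludes exactly the inputs where Python A raises ValueError: some message shorter than k.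
def Pre_common_phrases (messages : List String) (k : Int) : Prop :=
  ∀ m ∈ messages, k ≤ PySem.Str.len m
instance (messages : List String) (k : Int) : Decidable (Pre_common_phrases messages k) := by
  unfold Pre_common_phrases; infer_instance
def pvWitness_common_phrases : List String × Int := (["abab", "bcab"], 2)

def Spec_common_phrases (messages : List String) (k : Int) (out : Option (List String)) : Prop := out = common_phrases_alt messages k
instance (messages : List String) (k : Int) (out : Option (List String)) : Decidable (Spec_common_phrases messages k out) := by unfold Spec_common_phrases; infer_instance

-- ===== CLAIM (what is proved, stated in full; the proofs are below) =====
def Claim_equal_common_phrases : Prop := ∀ (messages : List String) (k : Int), Dom_common_phrases messages k → Pre_common_phrases messages k → Spec_common_phrases messages k (common_phrases messages k)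

-- ===== LEMMAS AND PROOFS =====

-- the distinct k-substrings of message m, as A's rolling-hash key set
def pvSubs (k : Int) (m : String) : PySem.Set String :=
  PySem.Set.ofList (rollingHash m 0 k).keys

theorem pvSubs_eq_dedup (k : Int) (m : String) :
    pvSubs k m = PySem.List.dedup ((kStrings? m k).getD []) := by
  rw [pvSubs, rollingHash, PySem.Dict.keys_foldl_insert, PySem.Dict.keys_empty,
      PySem.Set.update_nil_left, PySem.Set.ofList_ofList, PySem.List.dedup_eq_ofList]

theorem pvSubs_nodup (k : Int) (m : String) : (pvSubs k m).Nodup := by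
  rw [pvSubs_eq_dedup]; exact PySem.List.nodup_dedup _

theorem pvSubs_ofList (k : Int) (m : String) :
    PySem.Set.ofList (pvSubs k m) = pvSubs k m := by
  rw [pvSubs, PySem.Set.ofList_ofList]

-- A's intersection loop is a filter of the start set
theorem foldA_gen (g : String → PySem.Set String) :
    ∀ (rest : List String) (p : PySem.Set String),
    rest.foldl
      (fun phrases message =>
        let keys := g message
        match phrases with
        | none => some keys
        | some q => some (PySem.Set.inter q keys))
      (some p)
    = some (p.filter (fun s => decide (∀ m ∈ rest, s ∈ g m))) := by
  intro rest
  induction rest with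
  | nil => intro p; simp
  | cons m rest ih =>
    intro p
    simp only [List.foldl_cons]
    rw [ih]
    congr 1
    rw [show PySem.Set.inter p (g m) = List.filter (fun x => PySem.Set.contains (g m) x) p from rfl,
        List.filter_filter]
    apply List.filter_congr
    intro s _
    by_cases h : s ∈ g m <;> by_cases h2 : ∀ x ∈ rest, s ∈ g x <;> simp [h, h2]

-- B's nested counting loop is a single loop over all messages' distinct substrings
theorem pvCounts (k : Int) :
    ∀ (ms : List String) (d : PySem.Dict String Int),
      ms.foldl
        (fun d message =>
          (PySem.List.dedup ((kStrings? message k).getD [])).foldl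
            (fun d s => d.insert s (d.getD s 0 + 1)) d)
        d
      = (ms.flatMap (fun m => PySem.List.dedup ((kStrings? m k).getD []))).foldl
          (fun d s => d.insert s (d.getD s 0 + 1)) d := by
  intro ms
  induction ms with
  | nil => intro d; rfl
  | cons m ms ih => intro d; simp only [List.foldl_cons, List.flatMap_cons, List.foldl_append, ih]

theorem pvCount_le (k : Int) (ms : List String) (s : String) :
    (ms.flatMap (pvSubs k)).count s ≤ ms.length := by
  induction ms with
  | nil => simp
  | cons m ms ih =>
    have h1 : (pvSubs k m).count s ≤ 1 :=
      List.nodup_iff_count_le_one.mp (pvSubs_nodup k m) s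
    simp only [List.flatMap_cons, List.count_append, List.length_cons]
    omega

theorem pvCount_iff (k : Int) (ms : List String) (s : String) :
    (ms.flatMap (pvSubs k)).count s = ms.length ↔ ∀ m ∈ ms, s ∈ pvSubs k m := by
  induction ms with
  | nil => simp
  | cons m ms ih =>
    have hle := pvCount_le k ms s
    simp only [List.flatMap_cons, List.count_append, List.length_cons, List.forall_mem_cons, ← ih]
    by_cases h : s ∈ pvSubs k m
    · rw [List.count_eq_one_of_mem (pvSubs_nodup k m) h]
      constructor
      · intro he; exact ⟨h, by omega⟩
      · rintro ⟨-, he⟩; omega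
    · rw [List.count_eq_zero_of_not_mem h]
      constructor
      · intro he; omega
      · rintro ⟨hc, -⟩; exact absurd hc h

theorem pv_main (k : Int) (m0 : String) (ms : List String) :
    common_phrases (m0 :: ms) k = common_phrases_alt (m0 :: ms) k := by
  -- A's side: iterated intersection = filter of the first message's substrings
  have hA : common_phrases (m0 :: ms) k
      = some ((pvSubs k m0).filter (fun s => decide (∀ m ∈ ms, s ∈ pvSubs k m))) := by
    simp only [common_phrases, List.foldl_cons]
    exact foldA_gen (fun message => PySem.Set.ofList (rollingHash message 0 k).keys) ms (pvSubs k m0)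
  -- B's side: the counting dict is the counter of all messages' distinct substrings
  have hfun : (fun m => PySem.List.dedup ((kStrings? m k).getD [])) = pvSubs k := by
    funext m; exact (pvSubs_eq_dedup k m).symm
  have hB : common_phrases_alt (m0 :: ms) k
      = some ((PySem.Set.ofList ((m0 :: ms).flatMap (pvSubs k))).filter
          (fun s => (((((m0 :: ms).flatMap (pvSubs k)).count s : Int)) == (PySem.List.len (m0 :: ms))))) := by
    simp only [common_phrases_alt, if_neg (List.cons_ne_nil m0 ms)]
    rw [pvCounts k (m0 :: ms) PySem.Dict.empty, hfun,
        PySem.Dict.foldl_insert_getD_add_one_eq_counter, PySem.Dict.items_counter]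
    rw [List.filter_map, List.map_map]
    simp [Function.comp_def]
  rw [hA, hB]
  congr 1
  set L := (m0 :: ms).flatMap (pvSubs k) with hL
  -- split B's deduped concatenation: first message's substrings, then the strictly new ones
  have hsplit : PySem.Set.ofList L
      = pvSubs k m0 ++ (PySem.Set.ofList (ms.flatMap (pvSubs k))).filter
          (fun y => !(PySem.Set.contains (pvSubs k m0) y)) := by
    rw [hL, List.flatMap_cons, PySem.Set.ofList_append, pvSubs_ofList,
        PySem.Set.update_eq_append_filter]
  rw [hsplit, List.filter_append]
  have hn : PySem.List.len (m0 :: ms) = ((ms.length + 1 : Nat) : Int) := by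
    simp [PySem.List.len_eq]
  -- the new ones contribute nothing: they miss the first message, so their count falls short
  have htail : ((PySem.Set.ofList (ms.flatMap (pvSubs k))).filter
        (fun y => !(PySem.Set.contains (pvSubs k m0) y))).filter
        (fun s => ((L.count s : Int) == PySem.List.len (m0 :: ms))) = [] := by
    rw [List.filter_eq_nil_iff]
    intro a ha
    have hmem := List.of_mem_filter ha
    have hnot : a ∉ pvSubs k m0 := by
      simpa [PySem.Set.contains_iff] using hmem
    have hc : L.count a ≤ ms.length := by
      rw [hL, List.flatMap_cons, List.count_append, List.count_eq_zero_of_not_mem hnot]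
      simpa using pvCount_le k ms a
    rw [hn]
    simp only [beq_iff_eq]
    intro he
    have : L.count a = ms.length + 1 := by exact_mod_cast he
    omega
  rw [htail, List.append_nil]
  -- on the first message's substrings the two predicates agree
  apply List.filter_congr
  intro s hs
  rw [hn]
  have hciff : L.count s = ms.length + 1 ↔ ∀ m ∈ ms, s ∈ pvSubs k m := by
    rw [hL]
    constructor
    · intro he
      have hall := (pvCount_iff k (m0 :: ms) s).mp (by simpa using he)
      exact fun m hm => hall m (List.mem_cons_of_mem m0 hm)
    · intro hall
      have h := (pvCount_iff k (m0 :: ms) s).mpr (by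
        intro m hm
        rw [List.mem_cons] at hm
        rcases hm with rfl | hm
        · exact hs
        · exact hall m hm)
      simpa using h
  by_cases h2 : ∀ m ∈ ms, s ∈ pvSubs k m
  · have hc : L.count s = ms.length + 1 := hciff.mpr h2
    simp only [hc, beq_self_eq_true, decide_eq_true_eq]
    exact h2
  · have hc : L.count s ≠ ms.length + 1 := fun he => h2 (hciff.mp he)
    simp only [h2, decide_false]
    symm
    rw [beq_eq_false_iff_ne]
    intro he
    exact hc (by exact_mod_cast he)

-- ===== VERDICT (by name: the statement is the Claim_ definition above) =====
theorem common_phrases_spec : Claim_equal_common_phrases := by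
  intro messages k _ _
  unfold Spec_common_phrases
  cases messages with
  | nil => rfl
  | cons m0 ms => exact pv_main k m0 ms
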